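-- pv_equiv track=rewrite | github.com/esbmc/esbmc | src/python-frontend/models/re.py | try_match_char_class_range
-- ===== SOURCE A (Python) =====
-- def try_match_char_class_range(pattern: str, pattern_len: int, string: str) -> int:
--     """Match [x-y]+ or [x-y]* patterns"""
--     if pattern_len != 6:
--         return -1
--
--     # Extract pattern characters to avoid constant folding issues
--     ch0: str = pattern[0]
--     ch2: str = pattern[2]
--     ch4: str = pattern[4]
--     if not (ch0 == '[' and ch2 == '-' and ch4 == ']'):
--         return -1
--
--     quantifier: str = pattern[5]
--     if quantifier != '+' and quantifier != '*':
--         return -1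
--
--     start_char: str = pattern[1]
--     end_char: str = pattern[3]
--     string_len: int = len(string)
--
--     if string_len == 0:
--         return 1 if quantifier == '*' else 0
--
--     i: int = 0
--     while i < string_len:
--         c: str = string[i]
--         if c < start_char or c > end_char:
--             return 0
--         i = i + 1
--     return 1
-- ===== SOURCE B (Python) =====
-- def try_match_char_class_range(pattern: str, pattern_len: int, string: str) -> int:
--     """Match [x-y]+ or [x-y]* patterns"""
--     if pattern_len != 6:
--         return -1
--     if pattern[0] != '[' or pattern[2] != '-' or pattern[4] != ']':
--         return -1
--     quantifier: str = pattern[5]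
--     if quantifier != '+' and quantifier != '*':
--         return -1
--     if not string:
--         return 1 if quantifier == '*' else 0
--     # min/max reduction instead of a per-character in-range scan
--     return 1 if pattern[1] <= min(string) and max(string) <= pattern[3] else 0
-- ===== Notes on version B (the rewrite author's own statement) =====
-- stated objective: alternative
-- what changed: The running per-character in-range scan with early return is replaced by a min/max reduction over the whole string: compute its smallest and largest character and compare those two extremes against the class bounds.
-- outside the precondition, e.g. on try_match_char_class_range('*a', 6, 'A'): A raises IndexError, B returns -1
import Mathlib
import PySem

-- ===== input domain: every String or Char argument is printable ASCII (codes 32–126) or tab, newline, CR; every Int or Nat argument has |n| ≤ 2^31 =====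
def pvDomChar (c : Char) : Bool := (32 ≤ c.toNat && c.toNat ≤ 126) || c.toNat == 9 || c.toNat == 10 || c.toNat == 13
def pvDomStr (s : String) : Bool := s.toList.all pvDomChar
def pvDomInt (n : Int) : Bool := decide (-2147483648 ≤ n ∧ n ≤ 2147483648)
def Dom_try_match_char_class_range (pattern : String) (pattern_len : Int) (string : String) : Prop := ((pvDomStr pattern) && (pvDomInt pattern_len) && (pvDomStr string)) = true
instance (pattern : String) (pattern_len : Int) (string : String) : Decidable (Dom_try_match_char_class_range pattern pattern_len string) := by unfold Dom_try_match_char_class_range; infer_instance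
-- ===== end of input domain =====

-- B replaces A's running in-range scan with a min/max reduction over the string (alternative decomposition, same cost).
-- Pre_ excludes inputs where pattern_len == 6 but the pattern has fewer than 6 characters: there A raises IndexError
-- (it reads pattern[0], pattern[2], pattern[4] unconditionally) while B may return -1 thanks to short-circuiting.


-- ===== PORT A =====
-- A's while-loop over string indices, as structural recursion over the character list with the same early return
def pvLoopA (start_char end_char : Char) : List Char → Int
  | [] => 1
  | c :: rest => if c < start_char ∨ end_char < c then 0 else pvLoopA start_char end_char rest

def try_match_char_class_range (pattern : String) (pattern_len : Int) (string : String) : Int :=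
  if pattern_len ≠ 6 then -1
  else
    match PySem.List.pyGet? pattern.toList 0, PySem.List.pyGet? pattern.toList 2,
          PySem.List.pyGet? pattern.toList 4 with
    | some ch0, some ch2, some ch4 =>
      if ¬ (ch0 = '[' ∧ ch2 = '-' ∧ ch4 = ']') then -1
      else
        match PySem.List.pyGet? pattern.toList 5 with
        | some quantifier =>
          if quantifier ≠ '+' ∧ quantifier ≠ '*' then -1
          else
            match PySem.List.pyGet? pattern.toList 1, PySem.List.pyGet? pattern.toList 3 with
            | some start_char, some end_char =>
              if (string.toList.length : Int) = 0 then (if quantifier = '*' then 1 else 0)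
              else pvLoopA start_char end_char string.toList
            | _, _ => -1      -- IndexError in Python; outside Pre_
        | none => -1          -- IndexError in Python; outside Pre_
    | _, _, _ => -1           -- IndexError in Python; outside Pre_

-- ===== PORT B =====
def try_match_char_class_range_alt (pattern : String) (pattern_len : Int) (string : String) : Int :=
  if pattern_len ≠ 6 then -1
  else
    -- short-circuit chain: pattern[2] is read only if pattern[0] == '[', etc.
    match PySem.List.pyGet? pattern.toList 0 with
    | none => -1
    | some ch0 =>
      if ch0 ≠ '[' then -1 else
      match PySem.List.pyGet? pattern.toList 2 with
      | none => -1
      | some ch2 =>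
        if ch2 ≠ '-' then -1 else
        match PySem.List.pyGet? pattern.toList 4 with
        | none => -1
        | some ch4 =>
          if ch4 ≠ ']' then -1 else
          match PySem.List.pyGet? pattern.toList 5 with
          | none => -1
          | some quantifier =>
            if quantifier ≠ '+' ∧ quantifier ≠ '*' then -1 else
            match string.toList with
            | [] => if quantifier = '*' then 1 else 0
            | c :: cs =>   -- min(string) and max(string): foldl reductions over the characters
              match PySem.List.pyGet? pattern.toList 1 with
              | none => -1
              | some start_char =>
                match PySem.List.pyGet? pattern.toList 3 with
                | none => -1
                | some end_char =>
                  if start_char ≤ cs.foldl min c ∧ cs.foldl max c ≤ end_char then 1 else 0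

-- ===== PRECONDITION & SPEC =====
-- Pre_ excludes exactly the inputs where pattern_len == 6 but len(pattern) < 6, on which A raises IndexError.
def Pre_try_match_char_class_range (pattern : String) (pattern_len : Int) (string : String) : Prop :=
  pattern_len = 6 → 6 ≤ pattern.toList.length
instance (pattern : String) (pattern_len : Int) (string : String) : Decidable (Pre_try_match_char_class_range pattern pattern_len string) := by unfold Pre_try_match_char_class_range; infer_instance

def pvWitness_try_match_char_class_range : String × Int × String := ("[a-z]+", 6, "abz")

def Spec_try_match_char_class_range (pattern : String) (pattern_len : Int) (string : String) (out : Int) : Prop := out = try_match_char_class_range_alt pattern pattern_len string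
instance (pattern : String) (pattern_len : Int) (string : String) (out : Int) : Decidable (Spec_try_match_char_class_range pattern pattern_len string out) := by unfold Spec_try_match_char_class_range; infer_instance

-- ===== CLAIM (what is proved, stated in full; the proofs are below) =====
def Claim_equal_try_match_char_class_range : Prop := ∀ (pattern : String) (pattern_len : Int) (string : String), Dom_try_match_char_class_range pattern pattern_len string → Pre_try_match_char_class_range pattern pattern_len string → Spec_try_match_char_class_range pattern pattern_len string (try_match_char_class_range pattern pattern_len string)

-- ===== LEMMAS AND PROOFS =====

lemma pv_le_foldl_min_iff (s c : Char) (cs : List Char) :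
    s ≤ cs.foldl min c ↔ s ≤ c ∧ ∀ x ∈ cs, s ≤ x := by
  constructor
  · intro h
    exact ⟨le_trans h (PySem.List.foldl_min_le cs c).1,
           fun x hx => le_trans h ((PySem.List.foldl_min_le cs c).2 x hx)⟩
  · rintro ⟨h1, h2⟩
    rcases PySem.List.foldl_min_mem cs c with h | h
    · rw [h]; exact h1
    · exact h2 _ h

lemma pv_foldl_max_le_iff (e c : Char) (cs : List Char) :
    cs.foldl max c ≤ e ↔ c ≤ e ∧ ∀ x ∈ cs, x ≤ e := by
  constructor
  · intro h
    exact ⟨le_trans (PySem.List.le_foldl_max cs c).1 h,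
           fun x hx => le_trans ((PySem.List.le_foldl_max cs c).2 x hx) h⟩
  · rintro ⟨h1, h2⟩
    rcases PySem.List.foldl_max_mem cs c with h | h
    · rw [h]; exact h1
    · exact h2 _ h

lemma pvLoopA_eq_all (s e : Char) (l : List Char) :
    pvLoopA s e l = if ∀ x ∈ l, s ≤ x ∧ x ≤ e then 1 else 0 := by
  induction l with
  | nil => simp [pvLoopA]
  | cons c cs ih =>
    simp only [pvLoopA, ih, List.mem_cons]
    by_cases hc : c < s ∨ e < c
    · rw [if_pos hc, if_neg]
      intro h
      rcases h c (Or.inl rfl) with ⟨h1, h2⟩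
      rcases hc with h' | h'
      · exact absurd h1 (not_le.mpr h')
      · exact absurd h2 (not_le.mpr h')
    · rw [if_neg hc]
      rw [not_or, not_lt, not_lt] at hc
      by_cases hall : ∀ x ∈ cs, s ≤ x ∧ x ≤ e
      · rw [if_pos hall, if_pos]
        rintro x (rfl | hx)
        · exact ⟨hc.1, hc.2⟩
        · exact hall x hx
      · rw [if_neg hall, if_neg]
        intro h; exact hall (fun x hx => h x (Or.inr hx))

lemma pvLoopA_eq_minmax (s e c : Char) (cs : List Char) :
    pvLoopA s e (c :: cs) = if s ≤ cs.foldl min c ∧ cs.foldl max c ≤ e then 1 else 0 := by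
  rw [pvLoopA_eq_all]
  congr 1
  simp only [eq_iff_iff, pv_le_foldl_min_iff, pv_foldl_max_le_iff, List.mem_cons]
  constructor
  · rintro h
    exact ⟨⟨(h c (Or.inl rfl)).1, fun x hx => (h x (Or.inr hx)).1⟩,
           ⟨(h c (Or.inl rfl)).2, fun x hx => (h x (Or.inr hx)).2⟩⟩
  · rintro ⟨⟨h1, h2⟩, ⟨h3, h4⟩⟩ x (rfl | hx)
    · exact ⟨h1, h3⟩
    · exact ⟨h2 x hx, h4 x hx⟩

-- ===== VERDICT (by name: the statement is the Claim_ definition above) =====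
theorem try_match_char_class_range_spec : Claim_equal_try_match_char_class_range := by
  intro pattern pattern_len string _ hpre
  unfold Spec_try_match_char_class_range try_match_char_class_range try_match_char_class_range_alt
  by_cases hlen : pattern_len ≠ 6
  · simp [hlen]
  · have hp6 : 6 ≤ pattern.toList.length := hpre (by omega)
    have g : ∀ k : Int, 0 ≤ k → k < 6 → PySem.List.pyGet? pattern.toList k ≠ none := by
      intro k hk0 hk6 h
      rw [PySem.List.pyGet?_eq_none_iff] at h
      apply h
      simp only [PySem.Raise.InRange]
      omega
    simp only [hlen, if_false]
    cases h0 : PySem.List.pyGet? pattern.toList 0 with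
    | none => exact absurd h0 (g 0 (by norm_num) (by norm_num))
    | some ch0 =>
      cases h2 : PySem.List.pyGet? pattern.toList 2 with
      | none => exact absurd h2 (g 2 (by norm_num) (by norm_num))
      | some ch2 =>
        cases h4 : PySem.List.pyGet? pattern.toList 4 with
        | none => exact absurd h4 (g 4 (by norm_num) (by norm_num))
        | some ch4 =>
          cases h5 : PySem.List.pyGet? pattern.toList 5 with
          | none => exact absurd h5 (g 5 (by norm_num) (by norm_num))
          | some quantifier =>
            cases h1 : PySem.List.pyGet? pattern.toList 1 with
            | none => exact absurd h1 (g 1 (by norm_num) (by norm_num))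
            | some start_char =>
              cases h3 : PySem.List.pyGet? pattern.toList 3 with
              | none => exact absurd h3 (g 3 (by norm_num) (by norm_num))
              | some end_char =>
                by_cases e0 : ch0 = '['
                · by_cases e2 : ch2 = '-'
                  · by_cases e4 : ch4 = ']'
                    · simp only [e0, e2, e4, and_self, not_true_eq_false, if_false, ne_eq,
                                 if_neg (by simp : ¬ ('[' : Char) ≠ '['),
                                 if_neg (by simp : ¬ ('-' : Char) ≠ '-')]
                      by_cases hq : quantifier ≠ '+' ∧ quantifier ≠ '*'
                      · simp [hq]
                      · simp only [hq, if_false]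
                        cases hs : string.toList with
                        | nil => simp
                        | cons c cs =>
                          have hne : ((c :: cs).length : Int) ≠ 0 := by
                            simp only [List.length_cons]; omega
                          simp only [hne, if_false]
                          exact pvLoopA_eq_minmax start_char end_char c cs
                    · simp [e0, e2, e4]
                  · simp [e0, e2]
                · simp [e0]
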